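-- pv_equiv track=rewrite | github.com/Sunil-Hegde/AdventOfCode | 2015/day24/day24.py | findSmallList
-- ===== SOURCE A (Python) =====
-- def findSmallList(combinations):
--     minLength = min(map(len, combinations))
--     smallList = []
--     quantumEntanglement = []
--     for i in combinations:
--         if len(i) == minLength:
--             smallList.append(i)
--
--     for j in smallList:
--         entanglement = 1
--         for k in j:
--             entanglement*=k
--         quantumEntanglement.append(entanglement)
--     return min(quantumEntanglement)
-- ===== SOURCE B (Python) =====
-- def findSmallList(combinations):
--     def key(c):
--         p = 1
--         for x in c:
--             p *= x
--         return (len(c), p)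
--     return min(map(key, combinations))[1]
-- ===== Notes on version B (the rewrite author's own statement) =====
-- stated objective: alternative
-- what changed: Replaces A's three passes (min of lengths, filter to shortest, product list, min again) and its two intermediate lists by a single min over (length, product) key tuples, returning the tuple's second component.
import Mathlib
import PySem

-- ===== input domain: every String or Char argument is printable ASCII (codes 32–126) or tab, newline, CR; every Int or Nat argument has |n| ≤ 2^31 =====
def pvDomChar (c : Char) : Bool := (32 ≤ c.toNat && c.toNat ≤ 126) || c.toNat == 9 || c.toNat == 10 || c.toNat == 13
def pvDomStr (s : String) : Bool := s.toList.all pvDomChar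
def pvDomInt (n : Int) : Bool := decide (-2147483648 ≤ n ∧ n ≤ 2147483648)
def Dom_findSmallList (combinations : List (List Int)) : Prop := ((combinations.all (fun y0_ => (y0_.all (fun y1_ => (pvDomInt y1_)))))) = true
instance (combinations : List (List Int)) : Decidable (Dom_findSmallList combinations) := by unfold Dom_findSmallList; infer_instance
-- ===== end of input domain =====

-- B replaces A's three passes and two intermediate lists by one min over (length, product) key tuples (objective: alternative decomposition); return-value equivalence.

-- ===== PORT A =====
def findSmallList (combinations : List (List Int)) : Int :=
  let minLength := (PySem.List.min? (combinations.map (fun i => (i.length : Int))) (fun x => x)).getD 0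
  let smallList := combinations.foldl (fun acc i => if (i.length : Int) = minLength then acc ++ [i] else acc) []
  let quantumEntanglement := smallList.foldl (fun acc j => acc ++ [j.foldl (fun e k => e * k) 1]) []
  (PySem.List.min? quantumEntanglement (fun x => x)).getD 0

-- ===== PORT B =====
def findSmallList_alt (combinations : List (List Int)) : Int :=
  let tuples := combinations.map (fun c => ((c.length : Int), c.foldl (fun p x => p * x) 1))
  ((PySem.List.min2? tuples (fun p => p.1) (fun p => p.2)).getD (0, 0)).2

-- ===== PRECONDITION & SPEC =====
-- Pre_ excludes only the empty list, on which Python A raises ValueError (min() of an empty sequence); B raises there too.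
def Pre_findSmallList (combinations : List (List Int)) : Prop := combinations ≠ []
instance (combinations : List (List Int)) : Decidable (Pre_findSmallList combinations) := by unfold Pre_findSmallList; infer_instance
def pvWitness_findSmallList : List (List Int) := [[2, 3], [6], [5]]
def Spec_findSmallList (combinations : List (List Int)) (out : Int) : Prop := out = findSmallList_alt combinations
instance (combinations : List (List Int)) (out : Int) : Decidable (Spec_findSmallList combinations out) := by unfold Spec_findSmallList; infer_instance

-- ===== CLAIM (what is proved, stated in full; the proofs are below) =====
def Claim_equal_findSmallList : Prop := ∀ (combinations : List (List Int)), Dom_findSmallList combinations → Pre_findSmallList combinations → Spec_findSmallList combinations (findSmallList combinations)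

-- ===== LEMMAS AND PROOFS =====

-- Python's lexicographic ≤ on int pairs
def lexLe (a b : Int × Int) : Prop := a.1 < b.1 ∨ (a.1 = b.1 ∧ a.2 ≤ b.2)

-- the fold step hidden inside PySem.List.min2? on int-pair projections
def m2step (acc : Option (Int × Int)) (x : Int × Int) : Option (Int × Int) :=
  match acc with
  | none => some x
  | some m => if (decide (x.1 < m.1) || !decide (m.1 < x.1) && decide (x.2 < m.2)) = true then some x else some m

theorem min2?_eq (xs : List (Int × Int)) :
    PySem.List.min2? xs (fun p => p.1) (fun p => p.2) = xs.foldl m2step none := by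
  unfold PySem.List.min2?
  congr 1
  funext acc x
  cases acc with
  | none => rfl
  | some m => simp only [m2step]

theorem lexLe_trans {a b c : Int × Int} (h1 : lexLe a b) (h2 : lexLe b c) : lexLe a c := by
  unfold lexLe at *
  rcases h1 with h | ⟨h, h'⟩ <;> rcases h2 with g | ⟨g, g'⟩
  · exact Or.inl (lt_trans h g)
  · exact Or.inl (g ▸ h)
  · exact Or.inl (h ▸ g)
  · exact Or.inr ⟨h.trans g, h'.trans g'⟩

theorem m2step_lexLe (m x : Int × Int) :
    ∃ r, m2step (some m) x = some r ∧ (r = m ∨ r = x) ∧ lexLe r m ∧ lexLe r x := by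
  have hdef : m2step (some m) x =
      if (decide (x.1 < m.1) || !decide (m.1 < x.1) && decide (x.2 < m.2)) = true then some x else some m := rfl
  by_cases hc : (decide (x.1 < m.1) || !decide (m.1 < x.1) && decide (x.2 < m.2)) = true
  · have hp := hc
    simp only [Bool.or_eq_true, Bool.and_eq_true, Bool.not_eq_true', decide_eq_true_eq,
      decide_eq_false_iff_not] at hp
    refine ⟨x, by rw [hdef, if_pos hc], Or.inr rfl, ?_, Or.inr ⟨rfl, le_refl _⟩⟩
    unfold lexLe
    rcases hp with h | ⟨h, h'⟩
    · exact Or.inl h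
    · by_cases h2 : x.1 < m.1
      · exact Or.inl h2
      · exact Or.inr ⟨by omega, le_of_lt h'⟩
  · have hp := hc
    simp only [Bool.or_eq_true, Bool.and_eq_true, Bool.not_eq_true', decide_eq_true_eq,
      decide_eq_false_iff_not, not_or, not_and, not_lt] at hp
    refine ⟨m, by rw [hdef, if_neg hc], Or.inl rfl, Or.inr ⟨rfl, le_refl _⟩, ?_⟩
    unfold lexLe
    obtain ⟨h1, h2⟩ := hp
    by_cases h3 : m.1 < x.1
    · exact Or.inl h3
    · refine Or.inr ⟨by omega, ?_⟩
      have h4 : x.1 ≤ m.1 := by omega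
      have := h2 h4
      omega

theorem foldl_m2step_spec (xs : List (Int × Int)) :
    ∀ (a m : Int × Int), xs.foldl m2step (some a) = some m →
      (m = a ∨ m ∈ xs) ∧ lexLe m a ∧ ∀ y ∈ xs, lexLe m y := by
  induction xs with
  | nil =>
    intro a m h
    simp only [List.foldl_nil, Option.some.injEq] at h
    exact ⟨Or.inl h.symm, h ▸ Or.inr ⟨rfl, le_refl _⟩, by simp⟩
  | cons x t ih =>
    intro a m h
    obtain ⟨r, hr, hrax, hra, hrx⟩ := m2step_lexLe a x
    rw [List.foldl_cons, hr] at h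
    obtain ⟨hm, hlr, hall⟩ := ih r m h
    refine ⟨?_, lexLe_trans hlr hra, ?_⟩
    · rcases hm with h1 | h1
      · rcases hrax with h2 | h2
        · exact Or.inl (h1.trans h2)
        · exact Or.inr ((h1.trans h2) ▸ List.mem_cons_self)
      · exact Or.inr (List.mem_cons_of_mem _ h1)
    · intro y hy
      rcases List.mem_cons.mp hy with h1 | h1
      · exact h1 ▸ lexLe_trans hlr hrx
      · exact hall y h1

theorem foldl_m2step_some (t : List (Int × Int)) :
    ∀ (a : Int × Int), ∃ m, t.foldl m2step (some a) = some m := by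
  induction t with
  | nil => exact fun a => ⟨a, rfl⟩
  | cons y s ih =>
    intro a
    rw [List.foldl_cons]
    obtain ⟨r, hr, _, _, _⟩ := m2step_lexLe a y
    rw [hr]
    exact ih r

theorem min2?_spec (xs : List (Int × Int)) (hne : xs ≠ []) :
    ∃ m, PySem.List.min2? xs (fun p => p.1) (fun p => p.2) = some m ∧
      m ∈ xs ∧ ∀ y ∈ xs, lexLe m y := by
  rw [min2?_eq]
  match xs, hne with
  | x :: t, _ =>
    rw [List.foldl_cons]
    show ∃ m, t.foldl m2step (m2step none x) = some m ∧ _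
    have hstep : m2step none x = some x := rfl
    rw [hstep]
    obtain ⟨m, hm⟩ := foldl_m2step_some t x
    obtain ⟨hmem, hla, hall⟩ := foldl_m2step_spec t x m hm
    refine ⟨m, hm, ?_, ?_⟩
    · rcases hmem with h | h
      · exact h ▸ List.mem_cons_self
      · exact List.mem_cons_of_mem _ h
    · intro y hy
      rcases List.mem_cons.mp hy with h | h
      · exact h ▸ hla
      · exact hall y h

theorem Aside_eq (combs : List (List Int)) (mL : Int) (p : List Int → Bool)
    (hp : ∀ c, p c = true ↔ (c.length : Int) = mL)
    (w : Int × Int)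
    (hex : ∃ c ∈ combs, (c.length : Int) = mL)
    (hwmem : w ∈ combs.map (fun c => ((c.length : Int), c.foldl (fun q x => q * x) 1)))
    (hwmin : ∀ y ∈ combs.map (fun c => ((c.length : Int), c.foldl (fun q x => q * x) 1)), lexLe w y)
    (hw1 : w.1 = mL) :
    (PySem.List.min? ((combs.filter p).map (List.foldl (fun e k => e * k) 1)) (fun x => x)).getD 0 = w.2 := by
  set S := (combs.filter p).map (List.foldl (fun e k => e * k) 1) with hS
  have hSne : S ≠ [] := by
    obtain ⟨c0, hc0mem, hc0⟩ := hex
    simp only [hS, ne_eq, List.map_eq_nil_iff, List.filter_eq_nil_iff]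
    intro hcon
    exact hcon c0 hc0mem ((hp c0).mpr hc0)
  obtain ⟨v, hv⟩ : ∃ v, PySem.List.min? S (fun x => x) = some v := by
    cases h : PySem.List.min? S (fun x => x) with
    | none => exact absurd ((PySem.List.min?_eq_none_iff _ _).mp h) hSne
    | some m => exact ⟨m, rfl⟩
  have hvmem := PySem.List.min?_mem hv
  have hvmin := PySem.List.min?_isMin hv
  rw [hv, Option.getD_some]
  -- w.2 is among the filtered products, so v ≤ w.2
  have hvle : v ≤ w.2 := by
    obtain ⟨c, hcmem, hc⟩ := List.mem_map.mp hwmem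
    have hclen : (c.length : Int) = mL := by
      have h3 : ((c.length : Int), c.foldl (fun q x => q * x) 1).1 = w.1 := by rw [hc]
      simp only at h3
      omega
    have hcS : w.2 ∈ S := by
      refine List.mem_map.mpr ⟨c, List.mem_filter.mpr ⟨hcmem, (hp c).mpr hclen⟩, ?_⟩
      have h3 : ((c.length : Int), c.foldl (fun q x => q * x) 1).2 = w.2 := by rw [hc]
      simpa using h3
    exact hvmin w.2 hcS
  -- every filtered product is ≥ w.2, in particular v
  have hwle : w.2 ≤ v := by
    obtain ⟨c, hcmem, hc⟩ := List.mem_map.mp hvmem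
    have hcfilt := List.mem_filter.mp hcmem
    have hclen : (c.length : Int) = mL := (hp c).mp hcfilt.2
    have hct : ((c.length : Int), c.foldl (fun q x => q * x) 1) ∈
        combs.map (fun c => ((c.length : Int), c.foldl (fun q x => q * x) 1)) :=
      List.mem_map.mpr ⟨c, hcfilt.1, rfl⟩
    have h3 := hwmin _ hct
    unfold lexLe at h3
    simp only at h3
    rcases h3 with h | ⟨_, h⟩
    · omega
    · calc w.2 ≤ c.foldl (fun q x => q * x) 1 := h
        _ = v := hc
  exact le_antisymm hvle hwle

-- ===== VERDICT (by name: the statement is the Claim_ definition above) =====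
theorem findSmallList_spec : Claim_equal_findSmallList := by
  intro combs _ hne
  have hne' : combs ≠ [] := hne
  unfold Spec_findSmallList findSmallList findSmallList_alt
  dsimp only
  set t : List (Int × Int) := combs.map (fun c => ((c.length : Int), c.foldl (fun p x => p * x) 1)) with ht
  have htne : t ≠ [] := by simp [ht, hne']
  obtain ⟨w, hw, hwmem, hwmin⟩ := min2?_spec t htne
  -- A's minimum length
  have hlne : combs.map (fun i => (i.length : Int)) ≠ [] := by simp [hne']
  obtain ⟨mL, hmL⟩ : ∃ mL, PySem.List.min? (combs.map (fun i => (i.length : Int))) (fun x => x) = some mL := by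
    cases h : PySem.List.min? (combs.map (fun i => (i.length : Int))) (fun x => x) with
    | none => exact absurd ((PySem.List.min?_eq_none_iff _ _).mp h) hlne
    | some m => exact ⟨m, rfl⟩
  have hmLmem := PySem.List.min?_mem hmL
  have hmLmin := PySem.List.min?_isMin hmL
  rw [hmL]
  -- rewrite A's two loops as filter and map
  rw [PySem.List.foldl_append_ite_eq_filter, PySem.List.foldl_append_singleton_eq_map]
  simp only [Option.getD_some, List.nil_append]
  -- w.1 = mL
  have hw1 : w.1 = mL := by
    obtain ⟨c0, hc0mem, hc0⟩ := List.mem_map.mp hmLmem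
    have h1 : mL ≤ w.1 := by
      obtain ⟨c, hcmem, hc⟩ := List.mem_map.mp hwmem
      have h2 := hmLmin ((c.length : Int)) (List.mem_map.mpr ⟨c, hcmem, rfl⟩)
      have h3 : ((c.length : Int), c.foldl (fun p x => p * x) 1).1 = w.1 := by rw [hc]
      simp only at h3
      omega
    have h2 : w.1 ≤ mL := by
      have hct : ((c0.length : Int), c0.foldl (fun p x => p * x) 1) ∈ t :=
        List.mem_map.mpr ⟨c0, hc0mem, rfl⟩
      have h3 := hwmin _ hct
      unfold lexLe at h3
      simp only at h3
      rcases h3 with h | ⟨h, _⟩ <;> omega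
    omega
  have hgd : (((some w).getD ((0 : Int), (0 : Int))).2 : Int) = w.2 := rfl
  rw [hw, hgd]
  obtain ⟨c0, hc0mem, hc0⟩ := List.mem_map.mp hmLmem
  exact Aside_eq combs mL _ (fun c => by simp) w ⟨c0, hc0mem, by simpa using hc0⟩ hwmem hwmin hw1
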